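-- pv_equiv track=rewrite | github.com/adi-p/advent_of_code | 2021/day15.py | build_bigger
-- ===== SOURCE A (Python) =====
-- def build_bigger(board):
--     SMALL_HEIGHT = len(board)
--     SMALL_WIDTH = len(board[0])
--     big_board = [[ 0 for j in range(SMALL_WIDTH * 5)] for i in range(SMALL_HEIGHT * 5)]
--
--     for i in range(SMALL_HEIGHT):
--         for j in range(SMALL_WIDTH):
--             big_board[i][j] = board[i][j]
--             for k in range(1,5):
--                 big_board[i + (k * SMALL_HEIGHT)][j] = (big_board[i][j] + k) % 10 + 1 if (big_board[i][j] + k) > 9 else (big_board[i][j] + k)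
--
--
--     for i in range(SMALL_HEIGHT*5):
--         for j in range(SMALL_WIDTH):
--             for k in range(1,5):
--                 big_board[i][j + (k * SMALL_WIDTH)] = (big_board[i][j] + k) % 10 + 1 if (big_board[i][j] + k) > 9 else (big_board[i][j] + k)
--     return big_board
-- ===== SOURCE B (Python) =====
-- def build_bigger(board):
--     # One axis-generic expansion used twice around transposition: expand stacks
--     # 5 offset-bumped copies of the grid downward; transposing between the two
--     # applications makes the second expansion act horizontally.
--     def expand_down(g):
--         return [[v if k == 0 else (v + k) % 10 + 1 if (v + k) > 9 else (v + k)
--                  for v in row]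
--                 for k in range(5) for row in g]
--
--     def transpose(g):
--         return [list(col) for col in zip(*g)]
--
--     return transpose(expand_down(transpose(expand_down(board))))
-- ===== Notes on version B (the rewrite author's own statement) =====
-- stated objective: alternative
-- what changed: A preallocates the 5x5-tiled grid and fills it with two in-place index-arithmetic propagation passes (vertical then horizontal); B has no mutable grid and no index arithmetic at all: a single axis-generic 'expand downward into 5 bumped copies' function is applied twice, with a zip-based transpose between and after, so the second expansion acts horizontally.
-- outside the precondition, e.g. on build_bigger([[]]): A returns [[], [], [], [], []], B returns []
import Mathlib
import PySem

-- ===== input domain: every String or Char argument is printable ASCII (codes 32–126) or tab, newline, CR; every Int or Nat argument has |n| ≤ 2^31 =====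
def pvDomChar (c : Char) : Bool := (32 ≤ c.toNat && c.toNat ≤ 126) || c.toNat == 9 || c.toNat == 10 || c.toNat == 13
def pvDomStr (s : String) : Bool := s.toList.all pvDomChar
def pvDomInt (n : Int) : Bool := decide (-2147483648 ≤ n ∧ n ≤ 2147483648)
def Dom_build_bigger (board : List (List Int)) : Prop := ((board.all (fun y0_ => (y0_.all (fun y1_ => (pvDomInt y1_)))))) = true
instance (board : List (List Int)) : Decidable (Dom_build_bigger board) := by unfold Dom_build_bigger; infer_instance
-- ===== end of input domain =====

-- B replaces A's preallocated grid and its two in-place index-arithmetic passes by a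
-- single axis-generic "expand downward into 5 bumped copies" function applied twice
-- around a zip-based transpose; objective: alternative decomposition, no mutable state.

-- ===== PORT A =====
-- Python's `x % 10` with positive divisor 10: PySem.Int.mod is exact.
def pvF (v k : Int) : Int := if v + k > 9 then PySem.Int.mod (v + k) 10 + 1 else v + k

-- big_board[r][c] read / in-place write (A's indices are always in range)
def pvGet2 (bb : List (List Int)) (r c : Nat) : Int := (bb.getD r []).getD c 0
def pvSet2 (bb : List (List Int)) (r c : Nat) (x : Int) : List (List Int) :=
  bb.set r ((bb.getD r []).set c x)

def build_bigger (board : List (List Int)) : List (List Int) :=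
  let H := board.length
  let W := (board.getD 0 []).length
  let bb0 : List (List Int) := List.replicate (5*H) (List.replicate (5*W) 0)
  let bb1 := (List.range H).foldl (fun bb i =>
    (List.range W).foldl (fun bb j =>
      let bb := pvSet2 bb i j (pvGet2 board i j)
      (List.range' 1 4).foldl (fun bb k =>
        pvSet2 bb (i + k*H) j (pvF (pvGet2 bb i j) (k : Int))) bb) bb) bb0
  (List.range (5*H)).foldl (fun bb i =>
    (List.range W).foldl (fun bb j =>
      (List.range' 1 4).foldl (fun bb k =>
        pvSet2 bb i (j + k*W) (pvF (pvGet2 bb i j) (k : Int))) bb) bb) bb1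

-- ===== PORT B =====
-- `v if k == 0 else (v + k) % 10 + 1 if (v + k) > 9 else (v + k)`
def pvBump (v k : Int) : Int :=
  if k = 0 then v else if v + k > 9 then PySem.Int.mod (v + k) 10 + 1 else v + k

-- expand_down: stack 5 copies of the grid, copy k bumped by k
def pvExpand (g : List (List Int)) : List (List Int) :=
  (List.range 5).flatMap (fun k => g.map (fun row => row.map (fun v => pvBump v (k : Int))))

-- Python zip(*g): emit columns as long as every row still has an element
-- (fuel = first row's length; zip never runs longer than that)
def pvTransposeGo : Nat → List (List Int) → List (List Int)
  | 0, _ => []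
  | Nat.succ n, g =>
    if g.all (fun r => !r.isEmpty) then
      (g.map (fun r => r.headD 0)) :: pvTransposeGo n (g.map (fun r => r.tail))
    else []

def pvTranspose (g : List (List Int)) : List (List Int) :=
  match g with
  | [] => []
  | r :: rs => pvTransposeGo r.length (r :: rs)

def build_bigger_alt (board : List (List Int)) : List (List Int) :=
  pvTranspose (pvExpand (pvTranspose (pvExpand board)))

-- ===== PRECONDITION & SPEC =====
-- Pre_ excludes the inputs where A raises IndexError (the empty board, and a row
-- shorter than the first row), and additionally boards whose first row is empty,
-- on which the shape chosen for the zero-width expanded grid (A: 5H empty rows,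
-- B: the empty grid) is an accidental representation choice neither would specify.
def Pre_build_bigger (board : List (List Int)) : Prop :=
  board ≠ [] ∧ (board.getD 0 []) ≠ [] ∧
    ∀ row ∈ board, (board.getD 0 []).length ≤ row.length
instance (board : List (List Int)) : Decidable (Pre_build_bigger board) := by
  unfold Pre_build_bigger; infer_instance
def pvWitness_build_bigger : List (List Int) := [[1, 9], [8, 2]]

def Spec_build_bigger (board : List (List Int)) (out : List (List Int)) : Prop := out = build_bigger_alt board
instance (board : List (List Int)) (out : List (List Int)) : Decidable (Spec_build_bigger board out) := by unfold Spec_build_bigger; infer_instance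

-- ===== CLAIM (what is proved, stated in full; the proofs are below) =====
def Claim_equal_build_bigger : Prop := ∀ (board : List (List Int)), Dom_build_bigger board → Pre_build_bigger board → Spec_build_bigger board (build_bigger board)

-- ===== LEMMAS AND PROOFS =====

-- proof-side names for A's two passes (definitionally equal to the port's folds)
def p1body (board bb : List (List Int)) (i j : Nat) : List (List Int) :=
  (List.range' 1 4).foldl (fun bb k =>
    pvSet2 bb (i + k*board.length) j (pvF (pvGet2 bb i j) (k : Int)))
    (pvSet2 bb i j (pvGet2 board i j))
def p2body (W : Nat) (bb : List (List Int)) (r j : Nat) : List (List Int) :=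
  (List.range' 1 4).foldl (fun bb k =>
    pvSet2 bb r (j + k*W) (pvF (pvGet2 bb r j) (k : Int))) bb

def ShapeG (bb : List (List Int)) (R C : Nat) : Prop :=
  bb.length = R ∧ ∀ i < R, (bb.getD i []).length = C

theorem getD_set' {α : Type} {l : List α} {i j : Nat} {a d : α} :
    (l.set i a).getD j d = if i = j ∧ i < l.length then a else l.getD j d := by
  simp only [List.getD_eq_getElem?_getD, List.getElem?_set]
  by_cases h1 : i = j
  · subst h1
    by_cases h2 : i < l.length <;> simp [h2]
  · simp [h1]

theorem shape_set {bb : List (List Int)} {R C r c : Nat} {x : Int}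
    (h : ShapeG bb R C) (hr : r < R) : ShapeG (pvSet2 bb r c x) R C := by
  obtain ⟨hl, hrow⟩ := h
  refine ⟨by simp [pvSet2, hl], ?_⟩
  intro i hi
  unfold pvSet2
  rw [getD_set']
  split_ifs with he
  · rw [List.length_set]
    exact hrow r hr
  · exact hrow i hi

theorem get_set_same {bb : List (List Int)} {R C r c : Nat} {x : Int}
    (h : ShapeG bb R C) (hr : r < R) (hc : c < C) :
    pvGet2 (pvSet2 bb r c x) r c = x := by
  obtain ⟨hl, hrow⟩ := h
  unfold pvGet2 pvSet2
  rw [getD_set', if_pos ⟨rfl, hl ▸ hr⟩, getD_set', if_pos ⟨rfl, (hrow r hr) ▸ hc⟩]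

theorem get_set_other {bb : List (List Int)} {r c r' c' : Nat} {x : Int}
    (h : r ≠ r' ∨ c ≠ c') :
    pvGet2 (pvSet2 bb r c x) r' c' = pvGet2 bb r' c' := by
  unfold pvGet2 pvSet2
  rw [getD_set']
  split_ifs with he
  · obtain ⟨he1, he2⟩ := he
    rcases h with h | h
    · exact absurd he1 h
    · subst he1
      rw [getD_set', if_neg (fun hh => h hh.1)]
  · rfl

theorem grid_ext {a b : List (List Int)} {R C : Nat}
    (ha : ShapeG a R C) (hb : ShapeG b R C)
    (h : ∀ r < R, ∀ c < C, pvGet2 a r c = pvGet2 b r c) : a = b := by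
  obtain ⟨hal, har⟩ := ha
  obtain ⟨hbl, hbr⟩ := hb
  apply List.ext_getElem (by omega)
  intro r hr1 hr2
  have hrR : r < R := hal ▸ hr1
  have hga : a.getD r [] = a[r] := by
    rw [List.getD_eq_getElem?_getD, List.getElem?_eq_getElem hr1]; rfl
  have hgb : b.getD r [] = b[r] := by
    rw [List.getD_eq_getElem?_getD, List.getElem?_eq_getElem hr2]; rfl
  apply List.ext_getElem
  · rw [← hga, ← hgb, har r hrR, hbr r hrR]
  · intro c hc1 hc2
    have hcC : c < C := by rw [← hga] at hc1; exact (har r hrR) ▸ hc1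
    have := h r hrR c hcC
    unfold pvGet2 at this
    rw [hga, hgb] at this
    rwa [List.getD_eq_getElem?_getD, List.getElem?_eq_getElem hc1,
         List.getD_eq_getElem?_getD, List.getElem?_eq_getElem hc2] at this

theorem shape_of_mem {bb : List (List Int)} {R C : Nat}
    (hl : bb.length = R) (h : ∀ row ∈ bb, row.length = C) : ShapeG bb R C := by
  refine ⟨hl, ?_⟩
  intro i hi
  have hi' : i < bb.length := hl ▸ hi
  rw [List.getD_eq_getElem?_getD, List.getElem?_eq_getElem hi']
  exact h _ (List.getElem_mem hi')

theorem decomp_inj {i1 k1 i2 k2 H : Nat} (h1 : i1 < H) (h2 : i2 < H)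
    (h : i1 + k1 * H = i2 + k2 * H) : i1 = i2 ∧ k1 = k2 := by
  have hm := congrArg (· % H) h
  simp only [Nat.add_mul_mod_self_right, Nat.mod_eq_of_lt h1, Nat.mod_eq_of_lt h2] at hm
  subst hm
  have hk : k1 * H = k2 * H := by omega
  exact ⟨rfl, Nat.eq_of_mul_eq_mul_right (by omega) hk⟩

theorem pvBump_zero (v : Int) : pvBump v ((0 : Nat) : Int) = v := by simp [pvBump]
theorem pvBump_ne_zero (v : Int) {k : Nat} (h : k ≠ 0) :
    pvBump v (k : Int) = pvF v (k : Int) := by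
  simp [pvBump, pvF, h]

theorem range'14 : List.range' 1 4 = [1, 2, 3, 4] := rfl

theorem fold1_get (board bb : List (List Int)) (i0 j : Nat)
    (hsh : ShapeG bb (5*board.length) (5*(board.getD 0 []).length))
    (hi0 : i0 < board.length) (hj : j < (board.getD 0 []).length) :
    ShapeG (p1body board bb i0 j) (5*board.length) (5*(board.getD 0 []).length) ∧
    ∀ i < board.length, ∀ k < 5, ∀ c < 5*(board.getD 0 []).length,
      pvGet2 (p1body board bb i0 j) (i + k*board.length) c =
        if i = i0 ∧ c = j then pvBump (pvGet2 board i0 j) (k : Int)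
        else pvGet2 bb (i + k*board.length) c := by
  set H := board.length with hH
  set W := (board.getD 0 []).length with hW
  set v0 := pvGet2 board i0 j with hv0
  unfold p1body
  rw [range'14]
  simp only [List.foldl_cons, List.foldl_nil]
  have hi0R : i0 < 5*H := by omega
  have hjC : j < 5*W := by omega
  have hs0 : ShapeG (pvSet2 bb i0 j v0) (5*H) (5*W) := shape_set hsh hi0R
  have h0 : pvGet2 (pvSet2 bb i0 j v0) i0 j = v0 := get_set_same hsh hi0R hjC
  rw [h0]
  set b0 := pvSet2 bb i0 j v0 with hb0
  set b1 := pvSet2 b0 (i0 + 1*H) j (pvF v0 ((1:Nat) : Int)) with hb1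
  have hs1 : ShapeG b1 (5*H) (5*W) := shape_set hs0 (by omega)
  have h1 : pvGet2 b1 i0 j = v0 := by rw [hb1, get_set_other (Or.inl (by omega)), h0]
  rw [h1]
  set b2 := pvSet2 b1 (i0 + 2*H) j (pvF v0 ((2:Nat) : Int)) with hb2
  have hs2 : ShapeG b2 (5*H) (5*W) := shape_set hs1 (by omega)
  have h2 : pvGet2 b2 i0 j = v0 := by rw [hb2, get_set_other (Or.inl (by omega)), h1]
  rw [h2]
  set b3 := pvSet2 b2 (i0 + 3*H) j (pvF v0 ((3:Nat) : Int)) with hb3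
  have hs3 : ShapeG b3 (5*H) (5*W) := shape_set hs2 (by omega)
  have h3 : pvGet2 b3 i0 j = v0 := by rw [hb3, get_set_other (Or.inl (by omega)), h2]
  rw [h3]
  set b4 := pvSet2 b3 (i0 + 4*H) j (pvF v0 ((4:Nat) : Int)) with hb4
  have hs4 : ShapeG b4 (5*H) (5*W) := shape_set hs3 (by omega)
  refine ⟨hs4, ?_⟩
  intro i hi k hk c hc
  by_cases hcj : c = j
  · subst hcj
    by_cases hii : i = i0
    · subst hii
      interval_cases k
      · rw [hb4, get_set_other (Or.inl (by omega)), hb3, get_set_other (Or.inl (by omega)),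
            hb2, get_set_other (Or.inl (by omega)), hb1, get_set_other (Or.inl (by omega))]
        simp only [Nat.zero_mul, Nat.add_zero] at *
        rw [h0]
        norm_num [pvBump, pvF]
      · rw [hb4, get_set_other (Or.inl (by omega)), hb3, get_set_other (Or.inl (by omega)),
            hb2, get_set_other (Or.inl (by omega)), hb1, get_set_same hs0 (by omega) hjC]
        norm_num [pvBump, pvF]
      · rw [hb4, get_set_other (Or.inl (by omega)), hb3, get_set_other (Or.inl (by omega)),
            hb2, get_set_same hs1 (by omega) hjC]
        norm_num [pvBump, pvF]
      · rw [hb4, get_set_other (Or.inl (by omega)), hb3, get_set_same hs2 (by omega) hjC]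
        norm_num [pvBump, pvF]
      · rw [hb4, get_set_same hs3 (by omega) hjC]
        norm_num [pvBump, pvF]
    · have hne : ∀ m : Nat, i0 + m*H ≠ i + k*H := by
        intro m hm
        exact hii ((decomp_inj hi0 hi hm).1).symm
      have hne0 : i0 ≠ i + k*H := by
        have := hne 0; omega
      rw [hb4, get_set_other (Or.inl (hne 4)), hb3, get_set_other (Or.inl (hne 3)),
          hb2, get_set_other (Or.inl (hne 2)), hb1, get_set_other (Or.inl (hne 1)),
          hb0, get_set_other (Or.inl hne0)]
      simp [hii]
  · rw [hb4, get_set_other (Or.inr (Ne.symm hcj)), hb3, get_set_other (Or.inr (Ne.symm hcj)),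
        hb2, get_set_other (Or.inr (Ne.symm hcj)), hb1, get_set_other (Or.inr (Ne.symm hcj)),
        hb0, get_set_other (Or.inr (Ne.symm hcj))]
    simp [hcj]

theorem fold1_inner (board bb : List (List Int)) (i0 : Nat)
    (hsh : ShapeG bb (5*board.length) (5*(board.getD 0 []).length))
    (hi0 : i0 < board.length) :
    ∀ n, n ≤ (board.getD 0 []).length →
    ShapeG ((List.range n).foldl (fun bb j => p1body board bb i0 j) bb)
      (5*board.length) (5*(board.getD 0 []).length) ∧
    ∀ i < board.length, ∀ k < 5, ∀ c < 5*(board.getD 0 []).length,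
      pvGet2 ((List.range n).foldl (fun bb j => p1body board bb i0 j) bb) (i + k*board.length) c =
        if i = i0 ∧ c < n then pvBump (pvGet2 board i0 c) (k : Int)
        else pvGet2 bb (i + k*board.length) c := by
  intro n
  induction n with
  | zero =>
    intro _
    simp only [List.range_zero, List.foldl_nil]
    refine ⟨hsh, ?_⟩
    intro i _ k _ c _
    simp
  | succ n ih =>
    intro hn
    obtain ⟨ihs, ihg⟩ := ih (by omega)
    rw [List.range_succ, List.foldl_append, List.foldl_cons, List.foldl_nil]
    obtain ⟨hs', hg'⟩ := fold1_get board _ i0 n ihs hi0 (by omega)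
    refine ⟨hs', ?_⟩
    intro i hi k hk c hc
    rw [hg' i hi k hk c hc]
    by_cases h1 : i = i0 ∧ c = n
    · rw [if_pos h1, if_pos ⟨h1.1, by omega⟩, h1.2]
    · rw [if_neg h1, ihg i hi k hk c hc]
      by_cases h2 : i = i0 ∧ c < n
      · rw [if_pos h2, if_pos ⟨h2.1, by omega⟩]
      · rw [if_neg h2, if_neg (by rintro ⟨ha, hb⟩; rcases Nat.lt_succ_iff_lt_or_eq.mp hb with h | h
                                  · exact h2 ⟨ha, h⟩
                                  · exact h1 ⟨ha, h⟩)]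

theorem fold1_outer (board bb : List (List Int))
    (hsh : ShapeG bb (5*board.length) (5*(board.getD 0 []).length)) :
    ∀ m, m ≤ board.length →
    ShapeG ((List.range m).foldl (fun bb i =>
        (List.range (board.getD 0 []).length).foldl (fun bb j => p1body board bb i j) bb) bb)
      (5*board.length) (5*(board.getD 0 []).length) ∧
    ∀ i < board.length, ∀ k < 5, ∀ c < 5*(board.getD 0 []).length,
      pvGet2 ((List.range m).foldl (fun bb i =>
          (List.range (board.getD 0 []).length).foldl (fun bb j => p1body board bb i j) bb) bb)
        (i + k*board.length) c =
        if i < m ∧ c < (board.getD 0 []).length then pvBump (pvGet2 board i c) (k : Int)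
        else pvGet2 bb (i + k*board.length) c := by
  intro m
  induction m with
  | zero =>
    intro _
    simp only [List.range_zero, List.foldl_nil]
    refine ⟨hsh, ?_⟩
    intro i _ k _ c _
    simp
  | succ m ih =>
    intro hm
    obtain ⟨ihs, ihg⟩ := ih (by omega)
    rw [List.range_succ, List.foldl_append, List.foldl_cons, List.foldl_nil]
    obtain ⟨hs', hg'⟩ := fold1_inner board _ m ihs (by omega) (board.getD 0 []).length le_rfl
    refine ⟨hs', ?_⟩
    intro i hi k hk c hc
    rw [hg' i hi k hk c hc]
    by_cases h1 : i = m ∧ c < (board.getD 0 []).length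
    · rw [if_pos h1, if_pos ⟨by omega, h1.2⟩, h1.1]
    · rw [if_neg h1, ihg i hi k hk c hc]
      by_cases h2 : i < m ∧ c < (board.getD 0 []).length
      · rw [if_pos h2, if_pos ⟨by omega, h2.2⟩]
      · rw [if_neg h2, if_neg (by rintro ⟨ha, hb⟩; rcases Nat.lt_succ_iff_lt_or_eq.mp ha with h | h
                                  · exact h2 ⟨h, hb⟩
                                  · exact h1 ⟨h, hb⟩)]

theorem fold2_get (bb : List (List Int)) (R W r j : Nat)
    (hsh : ShapeG bb R (5*W)) (hr : r < R) (hj : j < W) :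
    ShapeG (p2body W bb r j) R (5*W) ∧
    ∀ r' < R, ∀ j' < W, ∀ t < 5,
      pvGet2 (p2body W bb r j) r' (j' + t*W) =
        if r' = r ∧ j' = j ∧ t ≠ 0 then pvF (pvGet2 bb r j) (t : Int)
        else pvGet2 bb r' (j' + t*W) := by
  set x := pvGet2 bb r j with hx
  unfold p2body
  rw [range'14]
  simp only [List.foldl_cons, List.foldl_nil]
  set c1 := pvSet2 bb r (j + 1*W) (pvF x ((1:Nat) : Int)) with hc1
  have hs1 : ShapeG c1 R (5*W) := shape_set hsh hr
  have h1 : pvGet2 c1 r j = x := by rw [hc1, get_set_other (Or.inr (by omega))]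
  rw [h1]
  set c2 := pvSet2 c1 r (j + 2*W) (pvF x ((2:Nat) : Int)) with hc2
  have hs2 : ShapeG c2 R (5*W) := shape_set hs1 hr
  have h2 : pvGet2 c2 r j = x := by rw [hc2, get_set_other (Or.inr (by omega)), h1]
  rw [h2]
  set c3 := pvSet2 c2 r (j + 3*W) (pvF x ((3:Nat) : Int)) with hc3
  have hs3 : ShapeG c3 R (5*W) := shape_set hs2 hr
  have h3 : pvGet2 c3 r j = x := by rw [hc3, get_set_other (Or.inr (by omega)), h2]
  rw [h3]
  set c4 := pvSet2 c3 r (j + 4*W) (pvF x ((4:Nat) : Int)) with hc4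
  have hs4 : ShapeG c4 R (5*W) := shape_set hs3 hr
  refine ⟨hs4, ?_⟩
  intro r' hr' j' hj' t ht
  by_cases hrr : r' = r
  · subst hrr
    by_cases hjj : j' = j
    · subst hjj
      interval_cases t
      · rw [hc4, get_set_other (Or.inr (by omega)), hc3, get_set_other (Or.inr (by omega)),
            hc2, get_set_other (Or.inr (by omega)), hc1, get_set_other (Or.inr (by omega))]
        simp
      · rw [hc4, get_set_other (Or.inr (by omega)), hc3, get_set_other (Or.inr (by omega)),
            hc2, get_set_other (Or.inr (by omega)), hc1, get_set_same hsh hr (by omega)]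
        norm_num
      · rw [hc4, get_set_other (Or.inr (by omega)), hc3, get_set_other (Or.inr (by omega)),
            hc2, get_set_same hs1 hr (by omega)]
        norm_num
      · rw [hc4, get_set_other (Or.inr (by omega)), hc3, get_set_same hs2 hr (by omega)]
        norm_num
      · rw [hc4, get_set_same hs3 hr (by omega)]
        norm_num
    · have hne : ∀ m, 1 ≤ m → m ≤ 4 → j + m*W ≠ j' + t*W := by
        intro m hm1 hm2 hcontra
        interval_cases t <;> interval_cases m <;> omega
      rw [hc4, get_set_other (Or.inr (hne 4 (by omega) (by omega))),
          hc3, get_set_other (Or.inr (hne 3 (by omega) (by omega))),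
          hc2, get_set_other (Or.inr (hne 2 (by omega) (by omega))),
          hc1, get_set_other (Or.inr (hne 1 (by omega) (by omega)))]
      simp [hjj]
  · rw [hc4, get_set_other (Or.inl (Ne.symm hrr)), hc3, get_set_other (Or.inl (Ne.symm hrr)),
        hc2, get_set_other (Or.inl (Ne.symm hrr)), hc1, get_set_other (Or.inl (Ne.symm hrr))]
    simp [hrr]

theorem fold2_inner (bb : List (List Int)) (R W r : Nat)
    (hsh : ShapeG bb R (5*W)) (hr : r < R) :
    ∀ n, n ≤ W →
    ShapeG ((List.range n).foldl (fun bb j => p2body W bb r j) bb) R (5*W) ∧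
    ∀ r' < R, ∀ j' < W, ∀ t < 5,
      pvGet2 ((List.range n).foldl (fun bb j => p2body W bb r j) bb) r' (j' + t*W) =
        if r' = r ∧ j' < n ∧ t ≠ 0 then pvF (pvGet2 bb r j') (t : Int)
        else pvGet2 bb r' (j' + t*W) := by
  intro n
  induction n with
  | zero =>
    intro _
    simp only [List.range_zero, List.foldl_nil]
    exact ⟨hsh, by intro r' _ j' _ t _; simp⟩
  | succ n ih =>
    intro hn
    obtain ⟨ihs, ihg⟩ := ih (by omega)
    rw [List.range_succ, List.foldl_append, List.foldl_cons, List.foldl_nil]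
    obtain ⟨hs', hg'⟩ := fold2_get _ R W r n ihs hr (by omega)
    have hread : pvGet2 ((List.range n).foldl (fun bb j => p2body W bb r j) bb) r n
        = pvGet2 bb r n := by
      have := ihg r hr n (by omega) 0 (by omega)
      simpa using this
    refine ⟨hs', ?_⟩
    intro r' hr' j' hj' t ht
    rw [hg' r' hr' j' hj' t ht]
    by_cases h1 : r' = r ∧ j' = n ∧ t ≠ 0
    · rw [if_pos h1, if_pos ⟨h1.1, by omega, h1.2.2⟩, hread, h1.2.1]
    · rw [if_neg h1, ihg r' hr' j' hj' t ht]
      by_cases h2 : r' = r ∧ j' < n ∧ t ≠ 0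
      · rw [if_pos h2, if_pos ⟨h2.1, by omega, h2.2.2⟩]
      · rw [if_neg h2, if_neg (by rintro ⟨ha, hb, hc⟩
                                  rcases Nat.lt_succ_iff_lt_or_eq.mp hb with h | h
                                  · exact h2 ⟨ha, h, hc⟩
                                  · exact h1 ⟨ha, h, hc⟩)]

theorem fold2_outer (bb : List (List Int)) (R W : Nat)
    (hsh : ShapeG bb R (5*W)) :
    ∀ m, m ≤ R →
    ShapeG ((List.range m).foldl (fun bb r =>
        (List.range W).foldl (fun bb j => p2body W bb r j) bb) bb) R (5*W) ∧
    ∀ r' < R, ∀ j' < W, ∀ t < 5,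
      pvGet2 ((List.range m).foldl (fun bb r =>
          (List.range W).foldl (fun bb j => p2body W bb r j) bb) bb) r' (j' + t*W) =
        if r' < m ∧ t ≠ 0 then pvF (pvGet2 bb r' j') (t : Int)
        else pvGet2 bb r' (j' + t*W) := by
  intro m
  induction m with
  | zero =>
    intro _
    simp only [List.range_zero, List.foldl_nil]
    exact ⟨hsh, by intro r' _ j' _ t _; simp⟩
  | succ m ih =>
    intro hm
    obtain ⟨ihs, ihg⟩ := ih (by omega)
    rw [List.range_succ, List.foldl_append, List.foldl_cons, List.foldl_nil]
    obtain ⟨hs', hg'⟩ := fold2_inner _ R W m ihs (by omega) W le_rfl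
    refine ⟨hs', ?_⟩
    intro r' hr' j' hj' t ht
    rw [hg' r' hr' j' hj' t ht]
    by_cases h1 : r' = m ∧ j' < W ∧ t ≠ 0
    · rw [if_pos h1, if_pos ⟨by omega, h1.2.2⟩]
      have : pvGet2 ((List.range m).foldl (fun bb r =>
          (List.range W).foldl (fun bb j => p2body W bb r j) bb) bb) m j'
          = pvGet2 bb m j' := by
        have := ihg m (by omega) j' h1.2.1 0 (by omega)
        simpa using this
      rw [h1.1, this]
    · rw [if_neg h1, ihg r' hr' j' hj' t ht]
      by_cases h2 : r' < m ∧ t ≠ 0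
      · rw [if_pos h2, if_pos ⟨by omega, h2.2⟩]
      · rw [if_neg h2, if_neg (by rintro ⟨ha, hc⟩
                                  rcases Nat.lt_succ_iff_lt_or_eq.mp ha with h | h
                                  · exact h2 ⟨h, hc⟩
                                  · exact h1 ⟨h, hj', hc⟩)]

theorem getD_append' {α : Type} {l1 l2 : List α} {n : Nat} {d : α} :
    (l1 ++ l2).getD n d = if n < l1.length then l1.getD n d else l2.getD (n - l1.length) d := by
  simp only [List.getD_eq_getElem?_getD]
  by_cases h : n < l1.length
  · rw [if_pos h, List.getElem?_append_left h]
  · rw [if_neg h, List.getElem?_append_right (by omega)]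

theorem getD_map_gen {α β : Type} (f : α → β) (d : α) (d' : β) {l : List α} {i : Nat}
    (h : i < l.length) : (l.map f).getD i d' = f (l.getD i d) := by
  rw [List.getD_eq_getElem?_getD, List.getElem?_map, List.getElem?_eq_getElem h,
      List.getD_eq_getElem?_getD, List.getElem?_eq_getElem h]
  rfl

theorem getD_range_map {α : Type} (f : Nat → α) (d : α) {n j : Nat} (h : j < n) :
    ((List.range n).map f).getD j d = f j := by
  rw [List.getD_eq_getElem?_getD, List.getElem?_map,
      List.getElem?_eq_getElem (by simpa using h)]
  simp

theorem headD_eq_getD {α : Type} (l : List α) (d : α) : l.headD d = l.getD 0 d := by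
  cases l <;> rfl

-- ===== B-side characterization =====

theorem expand_length (g : List (List Int)) : (pvExpand g).length = 5 * g.length := by
  unfold pvExpand
  rw [show List.range 5 = [0,1,2,3,4] from by decide]
  simp only [List.flatMap_cons, List.flatMap_nil, List.length_append,
             List.length_map, List.length_nil]
  omega

theorem expand_mem_len {g : List (List Int)} {r : List Int} (h : r ∈ pvExpand g) :
    ∃ row ∈ g, r.length = row.length := by
  unfold pvExpand at h
  simp only [List.mem_flatMap, List.mem_map] at h
  obtain ⟨k, _, row, hrow, hr⟩ := h
  exact ⟨row, hrow, by rw [← hr, List.length_map]⟩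

theorem expand_getD (g : List (List Int)) {i k : Nat} (hi : i < g.length) (hk : k < 5) :
    (pvExpand g).getD (i + k * g.length) [] =
      (g.getD i []).map (fun v => pvBump v (k : Int)) := by
  unfold pvExpand
  rw [show List.range 5 = [0,1,2,3,4] from by decide]
  simp only [List.flatMap_cons, List.flatMap_nil, List.append_nil]
  interval_cases k <;>
    simp only [getD_append', List.length_map]
  · rw [if_pos (by omega), show i + 0*g.length = i from by omega, getD_map_gen _ [] [] hi]
  · rw [if_neg (by omega), if_pos (by omega),
        show i + 1*g.length - g.length = i from by omega, getD_map_gen _ [] [] hi]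
  · rw [if_neg (by omega), if_neg (by omega), if_pos (by omega),
        show i + 2*g.length - g.length - g.length = i from by omega, getD_map_gen _ [] [] hi]
  · rw [if_neg (by omega), if_neg (by omega), if_neg (by omega), if_pos (by omega),
        show i + 3*g.length - g.length - g.length - g.length = i from by omega, getD_map_gen _ [] [] hi]
  · rw [if_neg (by omega), if_neg (by omega), if_neg (by omega), if_neg (by omega),
        show i + 4*g.length - g.length - g.length - g.length - g.length = i from by omega,
        getD_map_gen _ [] [] hi]

theorem transposeGo_eq (n : Nat) :
    ∀ g : List (List Int), (∀ r ∈ g, n ≤ r.length) →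
    pvTransposeGo n g = (List.range n).map (fun j => g.map (fun r => r.getD j 0)) := by
  induction n with
  | zero => intro g _; simp [pvTransposeGo]
  | succ n ih =>
    intro g h
    have hguard : g.all (fun r => !r.isEmpty) = true := by
      rw [List.all_eq_true]
      intro r hr
      have := h r hr
      simp only [Bool.not_eq_eq_eq_not, Bool.not_true, List.isEmpty_eq_false_iff]
      intro he; rw [he] at this; simp at this
    rw [pvTransposeGo, if_pos hguard]
    rw [ih (g.map (fun r => r.tail)) (by
      intro r hr
      simp only [List.mem_map] at hr
      obtain ⟨r', hr', he⟩ := hr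
      have := h r' hr'
      rw [← he, List.length_tail]
      omega)]
    rw [List.range_succ_eq_map]
    simp only [List.map_cons, List.map_map]
    congr 1
    · apply List.map_congr_left
      intro r _
      exact (headD_eq_getD r 0).symm ▸ rfl
    · apply List.map_congr_left
      intro j _
      simp only [Function.comp]
      apply List.map_congr_left
      intro r _
      simp [List.getD_eq_getElem?_getD, List.getElem?_tail]

theorem transpose_eq (g : List (List Int)) (hg : g ≠ [])
    (h : ∀ r ∈ g, (g.headD []).length ≤ r.length) :
    pvTranspose g =
      (List.range (g.headD []).length).map (fun j => g.map (fun r => r.getD j 0)) := by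
  cases g with
  | nil => exact absurd rfl hg
  | cons r rs => exact transposeGo_eq r.length (r :: rs) h

theorem alt_char (board : List (List Int)) (hne : board ≠ [])
    (hW0 : (board.getD 0 []) ≠ [])
    (hrows : ∀ row ∈ board, (board.getD 0 []).length ≤ row.length) :
    ShapeG (build_bigger_alt board) (5*board.length) (5*(board.getD 0 []).length) ∧
    ∀ i < board.length, ∀ k < 5, ∀ j < (board.getD 0 []).length, ∀ t < 5,
      pvGet2 (build_bigger_alt board) (i + k*board.length) (j + t*(board.getD 0 []).length) =
        pvBump (pvBump (pvGet2 board i j) (k : Int)) (t : Int) := by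
  set H := board.length with hH
  set W := (board.getD 0 []).length with hWdef
  have hHpos : 0 < H := List.length_pos_iff.mpr hne
  have hhead0 : board.headD [] = board.getD 0 [] := headD_eq_getD board []
  have hWpos : 0 < W := by
    rw [hWdef]
    exact List.length_pos_iff.mpr hW0
  -- E1 := pvExpand board
  set E1 := pvExpand board with hE1
  have hE1len : E1.length = 5 * H := expand_length board
  have hE1ne : E1 ≠ [] := by
    intro h
    have := congrArg List.length h
    rw [hE1len] at this
    simp at this
    omega
  have hE1get : ∀ i < H, ∀ k < 5,
      E1.getD (i + k*H) [] = (board.getD i []).map (fun v => pvBump v (k : Int)) := by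
    intro i hi k hk
    exact expand_getD board hi hk
  have hE1headlen : (E1.headD []).length = W := by
    have h0 := hE1get 0 hHpos 0 (by omega)
    simp only [Nat.zero_mul, Nat.add_zero] at h0
    rw [headD_eq_getD, h0, List.length_map]
  have hE1rows : ∀ r ∈ E1, (E1.headD []).length ≤ r.length := by
    intro r hr
    obtain ⟨row, hrow, hlen⟩ := expand_mem_len hr
    rw [hE1headlen, hlen]
    exact hrows row hrow
  -- T1 := pvTranspose E1
  set T1 := pvTranspose E1 with hT1def
  have hT1 : T1 = (List.range W).map (fun j => E1.map (fun r => r.getD j 0)) := by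
    rw [hT1def, transpose_eq E1 hE1ne hE1rows, hE1headlen]
  have hT1len : T1.length = W := by rw [hT1]; simp
  have hT1ne : T1 ≠ [] := by
    intro h
    have := congrArg List.length h
    rw [hT1len] at this
    simp at this
    omega
  have hT1get : ∀ j < W, T1.getD j [] = E1.map (fun r => r.getD j 0) := by
    intro j hj
    rw [hT1, getD_range_map _ _ hj]
  have hT1rowlen : ∀ r ∈ T1, r.length = 5*H := by
    intro r hr
    rw [hT1] at hr
    simp only [List.mem_map] at hr
    obtain ⟨j, _, he⟩ := hr
    rw [← he, List.length_map, hE1len]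
  -- E2 := pvExpand T1
  set E2 := pvExpand T1 with hE2def
  have hE2len : E2.length = 5 * W := by rw [hE2def, expand_length, hT1len]
  have hE2ne : E2 ≠ [] := by
    intro h
    have := congrArg List.length h
    rw [hE2len] at this
    simp at this
    omega
  have hE2get : ∀ j < W, ∀ t < 5,
      E2.getD (j + t*W) [] = (T1.getD j []).map (fun v => pvBump v (t : Int)) := by
    intro j hj t ht
    rw [hE2def, ← hT1len]
    exact expand_getD T1 (hT1len ▸ hj) ht
  have hE2head : (E2.headD []).length = 5*H := by
    have h0 := hE2get 0 hWpos 0 (by omega)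
    simp only [Nat.zero_mul, Nat.add_zero] at h0
    rw [headD_eq_getD, h0, List.length_map, hT1get 0 hWpos, List.length_map, hE1len]
  have hE2rows : ∀ r ∈ E2, r.length = 5*H := by
    intro r hr
    obtain ⟨row, hrow, hlen⟩ := expand_mem_len hr
    rw [hlen]
    exact hT1rowlen row hrow
  -- R := pvTranspose E2
  have hR : build_bigger_alt board =
      (List.range (5*H)).map (fun r => E2.map (fun row => row.getD r 0)) := by
    show pvTranspose E2 = _
    rw [transpose_eq E2 hE2ne (by intro r hr; rw [hE2rows r hr, hE2head]), hE2head]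
  constructor
  · rw [hR]
    refine ⟨by simp, ?_⟩
    intro r hr
    rw [getD_range_map _ _ hr, List.length_map, hE2len]
  · intro i hi k hk j hj t ht
    have hrowlen : j < (board.getD i []).length := by
      have hmem : board.getD i [] ∈ board := by
        rw [List.getD_eq_getElem?_getD, List.getElem?_eq_getElem (hH ▸ hi)]
        exact List.getElem_mem _
      have := hrows _ hmem
      omega
    have hik : i + k*H < 5*H := by
      have h4 : k*H ≤ 4*H := Nat.mul_le_mul_right H (by omega)
      omega
    have hjt : j + t*W < 5*W := by
      have h4 : t*W ≤ 4*W := Nat.mul_le_mul_right W (by omega)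
      omega
    unfold pvGet2
    rw [hR, getD_range_map _ _ hik,
        getD_map_gen _ [] 0 (by rw [hE2len]; exact hjt),
        hE2get j hj t ht,
        getD_map_gen _ 0 0 (by rw [hT1get j hj, List.length_map, hE1len]; exact hik),
        hT1get j hj,
        getD_map_gen _ [] 0 (by rw [hE1len]; exact hik),
        hE1get i hi k hk,
        getD_map_gen _ 0 0 hrowlen]

-- ===== VERDICT (by name: the statement is the Claim_ definition above) =====
theorem build_bigger_spec : Claim_equal_build_bigger := by
  intro board _hdom hpre
  unfold Spec_build_bigger
  obtain ⟨hne, hW0, hrows⟩ := hpre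
  have hA : build_bigger board =
      (List.range (5*board.length)).foldl (fun bb r =>
        (List.range (board.getD 0 []).length).foldl
          (fun bb j => p2body (board.getD 0 []).length bb r j) bb)
        ((List.range board.length).foldl (fun bb i =>
          (List.range (board.getD 0 []).length).foldl
            (fun bb j => p1body board bb i j) bb)
          (List.replicate (5*board.length) (List.replicate (5*(board.getD 0 []).length) 0))) := rfl
  rw [hA]
  set H := board.length with hH
  set W := (board.getD 0 []).length with hW
  have hHpos : 0 < H := List.length_pos_iff.mpr hne
  have hWpos : 0 < W := List.length_pos_iff.mpr hW0
  set bb0 : List (List Int) := List.replicate (5*H) (List.replicate (5*W) 0) with hbb0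
  have hs0 : ShapeG bb0 (5*H) (5*W) := by
    apply shape_of_mem (List.length_replicate)
    intro row hrow
    rw [List.eq_of_mem_replicate hrow, List.length_replicate]
  obtain ⟨hs1, hg1⟩ := fold1_outer board bb0 hs0 H le_rfl
  obtain ⟨hs2, hg2⟩ := fold2_outer _ (5*H) W hs1 (5*H) le_rfl
  obtain ⟨hsB, hgB⟩ := alt_char board hne hW0 hrows
  apply grid_ext hs2 hsB
  intro r hr c hc
  have hiH : r % H < H := Nat.mod_lt _ hHpos
  have hkk : r / H < 5 := (Nat.div_lt_iff_lt_mul hHpos).mpr hr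
  have hre : r % H + (r / H) * H = r := Nat.mod_add_div' r H
  have hjW : c % W < W := Nat.mod_lt _ hWpos
  have htt : c / W < 5 := (Nat.div_lt_iff_lt_mul hWpos).mpr hc
  have hce : c % W + (c / W) * W = c := Nat.mod_add_div' c W
  rw [← hre, ← hce]
  rw [hg2 (r % H + (r / H) * H) (by omega) (c % W) hjW (c / W) htt]
  rw [hgB (r % H) hiH (r / H) hkk (c % W) hjW (c / W) htt]
  have hbb1j : ∀ c' : Nat, c' < W →
      pvGet2 ((List.range H).foldl (fun bb i =>
        (List.range W).foldl (fun bb j => p1body board bb i j) bb) bb0)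
        (r % H + (r / H) * H) c' = pvBump (pvGet2 board (r % H) c') ((r / H : Nat) : Int) := by
    intro c' hc'
    rw [hg1 (r % H) hiH (r / H) hkk c' (by omega), if_pos ⟨hiH, hc'⟩]
  by_cases ht0 : c / W = 0
  · rw [if_neg (by omega)]
    rw [ht0]
    simp only [Nat.zero_mul, Nat.add_zero]
    rw [hbb1j (c % W) hjW, pvBump_zero]
  · rw [if_pos ⟨by omega, ht0⟩, hbb1j (c % W) hjW, pvBump_ne_zero _ ht0]
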